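-- pv_equiv track=rewrite | github.com/razan24152370-tech/jagir.ai | jobs/ai_service.py | _extract_skill_matches
-- ===== SOURCE A (Python) =====
-- def _extract_skill_matches(resume_text, job_skills):
--     """
--     Extract matched and missing skills using simple string matching.
--     Compatible with all Python versions, no spaCy dependency.
--     """
--     if not resume_text or not job_skills:
--         return [], list(job_skills)
--
--     # Normalize resume text for case-insensitive matching
--     resume_lower = resume_text.lower()
--
--     matched = []
--     missing = []
--
--     for skill in job_skills:
--         if not skill:
--             continue
--
--         # Check for exact match (case-insensitive) with word boundaries
--         skill_lower = skill.lower()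
--
--         # Check if skill appears as whole word or in common variations
--         # e.g., "python" matches "Python", "python,", "python.", etc.
--         if skill_lower in resume_lower:
--             matched.append(skill)
--         else:
--             missing.append(skill)
--
--     return matched, missing
-- ===== SOURCE B (Python) =====
-- def _extract_skill_matches(resume_text, job_skills):
--     if not resume_text or not job_skills:
--         return [], list(job_skills)
--
--     resume_lower = resume_text.lower()
--
--     # Memoised verdicts: each distinct lowercased skill is scanned against the
--     # resume exactly once.
--     verdict = {}
--     for skill in job_skills:
--         low = skill.lower()
--         if low not in verdict:
--             verdict[low] = low in resume_lower
--
--     skills = [s for s in job_skills if s]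
--     matched = [s for s in skills if verdict[s.lower()]]
--     missing = [s for s in skills if not verdict[s.lower()]]
--     return matched, missing
-- ===== Notes on version B (the rewrite author's own statement) =====
-- stated objective: alternative
-- what changed: B builds a memo dict of substring verdicts keyed by the lowercased skill (each distinct lowercase skill is scanned against the resume once) and then partitions the nonempty skills with two filter passes over that dict, instead of A's single loop that runs a fresh substring scan for every skill occurrence while pushing into two accumulators.
import Mathlib
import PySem

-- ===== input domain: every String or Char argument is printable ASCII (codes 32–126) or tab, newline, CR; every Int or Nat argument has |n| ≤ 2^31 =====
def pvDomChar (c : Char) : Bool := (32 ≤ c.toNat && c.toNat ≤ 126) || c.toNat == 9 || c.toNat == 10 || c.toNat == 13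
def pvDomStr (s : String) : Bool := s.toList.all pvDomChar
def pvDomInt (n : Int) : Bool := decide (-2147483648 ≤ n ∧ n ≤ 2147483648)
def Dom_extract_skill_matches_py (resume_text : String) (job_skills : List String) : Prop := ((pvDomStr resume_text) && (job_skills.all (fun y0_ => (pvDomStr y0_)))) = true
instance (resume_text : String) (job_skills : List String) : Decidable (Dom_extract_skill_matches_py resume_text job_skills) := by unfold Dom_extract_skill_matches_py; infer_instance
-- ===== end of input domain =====

-- ===== PORT A =====
-- B changes structure only (memo dict + two filters); same return value. A single loop vs dict+filters.
def extract_skill_matches_py (resume_text : String) (job_skills : List String) : List String × List String :=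
  if resume_text = "" ∨ job_skills = [] then ([], job_skills)
  else
    let resume_lower := PySem.Str.lower resume_text
    let acc := job_skills.foldl (fun (acc : List String × List String) skill =>
      if skill = "" then acc
      else
        let skill_lower := PySem.Str.lower skill
        if PySem.Str.isIn skill_lower resume_lower then (acc.1 ++ [skill], acc.2)
        else (acc.1, acc.2 ++ [skill])) ([], [])
    acc

-- ===== PORT B =====
-- Python's `verdict[s.lower()]` is a plain lookup that is always present; ported as getD with default false.
def extract_skill_matches_py_alt (resume_text : String) (job_skills : List String) : List String × List String :=
  if resume_text = "" ∨ job_skills = [] then ([], job_skills)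
  else
    let resume_lower := PySem.Str.lower resume_text
    let verdict := job_skills.foldl (fun (d : PySem.Dict String Bool) skill =>
      let low := PySem.Str.lower skill
      if d.contains low then d else d.insert low (PySem.Str.isIn low resume_lower))
      PySem.Dict.empty
    let skills := job_skills.filter (fun s => s != "")
    let matched := skills.filter (fun s => verdict.getD (PySem.Str.lower s) false)
    let missing := skills.filter (fun s => !(verdict.getD (PySem.Str.lower s) false))
    (matched, missing)

-- ===== PRECONDITION & SPEC =====
def Spec_extract_skill_matches_py (resume_text : String) (job_skills : List String) (out : List String × List String) : Prop := out = extract_skill_matches_py_alt resume_text job_skills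
instance (resume_text : String) (job_skills : List String) (out : List String × List String) : Decidable (Spec_extract_skill_matches_py resume_text job_skills out) := by unfold Spec_extract_skill_matches_py; infer_instance

-- ===== CLAIM (what is proved, stated in full; the proofs are below) =====
def Claim_equal_extract_skill_matches_py : Prop := ∀ (resume_text : String) (job_skills : List String), Dom_extract_skill_matches_py resume_text job_skills → Spec_extract_skill_matches_py resume_text job_skills (extract_skill_matches_py resume_text job_skills)

-- ===== LEMMAS AND PROOFS =====


-- invariant: every value stored in the memo dict is the verdict of its key
theorem pv_memo_invariant (rl : String) :
    ∀ (l : List String) (d : PySem.Dict String Bool),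
      (∀ k b, d.get? k = some b → b = PySem.Str.isIn k rl) →
      ∀ k b, (l.foldl (fun (d : PySem.Dict String Bool) skill =>
          let low := PySem.Str.lower skill
          if d.contains low then d else d.insert low (PySem.Str.isIn low rl)) d).get? k = some b →
        b = PySem.Str.isIn k rl := by
  intro l
  induction l with
  | nil => intro d hd k b h; exact hd k b h
  | cons s t ih =>
    intro d hd k b h
    refine ih _ ?_ k b h
    intro k' b' h'
    by_cases hc : d.contains (PySem.Str.lower s)
    · simp only [hc, if_pos] at h'; exact hd k' b' h'
    · simp only [hc, if_neg, Bool.not_eq_true] at h'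
      rcases eq_or_ne k' (PySem.Str.lower s) with rfl | hne
      · rw [PySem.Dict.get?_insert_self] at h'
        exact (Option.some_inj.mp h').symm
      · rw [PySem.Dict.get?_insert_of_ne _ _ hne] at h'
        exact hd k' b' h'

theorem pv_memo_mono (rl : String) :
    ∀ (l : List String) (d : PySem.Dict String Bool) (k : String),
      d.contains k = true →
      (l.foldl (fun (d : PySem.Dict String Bool) skill =>
          let low := PySem.Str.lower skill
          if d.contains low then d else d.insert low (PySem.Str.isIn low rl)) d).contains k = true := by
  intro l
  induction l with
  | nil => intro d k h; exact h
  | cons s t ih =>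
    intro d k h
    refine ih _ k ?_
    by_cases hc : d.contains (PySem.Str.lower s)
    · simpa [hc] using h
    · simp [hc, PySem.Dict.contains_insert, h]

theorem pv_step_contains (rl : String) (d : PySem.Dict String Bool) (s : String) :
    (if d.contains (PySem.Str.lower s) = true then d
     else d.insert (PySem.Str.lower s) (PySem.Str.isIn (PySem.Str.lower s) rl)).contains
      (PySem.Str.lower s) = true := by
  by_cases hc : d.contains (PySem.Str.lower s) = true
  · rwa [if_pos hc]
  · rw [if_neg hc]; exact PySem.Dict.contains_insert_self _ _ _

theorem pv_memo_contains (rl : String) :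
    ∀ (l : List String) (d : PySem.Dict String Bool) (s : String), s ∈ l →
      (l.foldl (fun (d : PySem.Dict String Bool) skill =>
          let low := PySem.Str.lower skill
          if d.contains low then d else d.insert low (PySem.Str.isIn low rl)) d).contains (PySem.Str.lower s) = true := by
  intro l
  induction l with
  | nil => intro d s h; cases h
  | cons x t ih =>
    intro d s h
    rcases List.mem_cons.mp h with rfl | hmem
    · rw [List.foldl_cons]
      exact pv_memo_mono rl t _ _ (pv_step_contains rl d s)
    · exact ih _ s hmem

theorem pv_memo_getD (rl : String) (l : List String) (s : String) (hs : s ∈ l) :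
    (l.foldl (fun (d : PySem.Dict String Bool) skill =>
        let low := PySem.Str.lower skill
        if d.contains low then d else d.insert low (PySem.Str.isIn low rl)) PySem.Dict.empty).getD
      (PySem.Str.lower s) false = PySem.Str.isIn (PySem.Str.lower s) rl := by
  set d := l.foldl (fun (d : PySem.Dict String Bool) skill =>
      let low := PySem.Str.lower skill
      if d.contains low then d else d.insert low (PySem.Str.isIn low rl)) PySem.Dict.empty with hd
  have hc : d.contains (PySem.Str.lower s) = true := pv_memo_contains rl l _ s hs
  rw [PySem.Dict.contains_eq_isSome_get?] at hc
  rcases Option.isSome_iff_exists.mp hc with ⟨b, hb⟩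
  have hv : b = PySem.Str.isIn (PySem.Str.lower s) rl := by
    refine pv_memo_invariant rl l PySem.Dict.empty ?_ _ b hb
    intro k b' h'; simp [PySem.Dict.get?_empty] at h'
  rw [PySem.Dict.getD_of_get?_eq_some _ _ hb, hv]

-- A's two-accumulator loop is append ++ the two filters of the nonempty skills
theorem pv_foldA (p : String → Bool) :
    ∀ (l : List String) (m ms : List String),
      l.foldl (fun (acc : List String × List String) skill =>
        if skill = "" then acc
        else if p skill then (acc.1 ++ [skill], acc.2) else (acc.1, acc.2 ++ [skill])) (m, ms)
      = (m ++ (l.filter (fun s => s != "")).filter p,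
         ms ++ (l.filter (fun s => s != "")).filter (fun s => !p s)) := by
  intro l
  induction l with
  | nil => intro m ms; simp
  | cons x t ih =>
    intro m ms
    by_cases hx : x = ""
    · simp [hx, List.foldl_cons, ih]
    · by_cases hp : p x = true
      · simp [List.foldl_cons, hx, hp, ih]
      · simp only [Bool.not_eq_true] at hp
        simp [List.foldl_cons, hx, hp, ih]

-- ===== VERDICT (by name: the statement is the Claim_ definition above) =====
theorem extract_skill_matches_py_spec : Claim_equal_extract_skill_matches_py := by
  intro resume_text job_skills _
  unfold Spec_extract_skill_matches_py extract_skill_matches_py extract_skill_matches_py_alt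
  by_cases h : resume_text = "" ∨ job_skills = []
  · simp [h]
  · simp only [h, if_neg, not_false_iff]
    rw [pv_foldA]
    have hcong : ∀ q : Bool → Bool,
        (job_skills.filter (fun s => s != "")).filter
            (fun s => q ((job_skills.foldl (fun (d : PySem.Dict String Bool) skill =>
              let low := PySem.Str.lower skill
              if d.contains low then d else d.insert low (PySem.Str.isIn low (PySem.Str.lower resume_text)))
              PySem.Dict.empty).getD (PySem.Str.lower s) false))
          = (job_skills.filter (fun s => s != "")).filter
            (fun s => q (PySem.Str.isIn (PySem.Str.lower s) (PySem.Str.lower resume_text))) := by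
      intro q
      apply List.filter_congr
      intro s hs
      rw [pv_memo_getD _ job_skills s (List.mem_of_mem_filter hs)]
    have h1 := hcong id
    have h2 := hcong (fun b => !b)
    simp only [id] at h1
    exact Prod.ext h1.symm h2.symm
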